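-- pv_equiv track=rewrite | github.com/Gjts/SuperOPC | scripts/cli/state.py | _extract_named
-- ===== SOURCE A (Python) =====
-- def _extract_named(args: list[str], keys: list[str]) -> dict[str, str | None]:
--     """Extract --key value pairs from args."""
--     result: dict[str, str | None] = {}
--     for key in keys:
--         flag = f"--{key}"
--         try:
--             idx = args.index(flag)
--             if idx + 1 < len(args) and not args[idx + 1].startswith("--"):
--                 result[key] = args[idx + 1]
--             else:
--                 result[key] = None
--         except ValueError:
--             result[key] = None
--     return result
-- ===== SOURCE B (Python) =====
-- def _extract_named(args: list[str], keys: list[str]) -> dict[str, str | None]: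
--     """Extract --key value pairs from args, in a single pass over args."""
--     result: dict[str, str | None] = {k: None for k in keys}
--     pending = set(keys)
--     nexts = [*args[1:], None]
--     for tok, nxt in zip(args, nexts):
--         if tok.startswith("--"):
--             name = tok[2:]
--             if name in pending:
--                 pending.discard(name)
--                 if nxt is not None and not nxt.startswith("--"):
--                     result[name] = nxt
--     return result
-- ===== Notes on version B (the rewrite author's own statement) =====
-- stated objective: faster
-- what changed: A searches args once per key with args.index; B pre-initializes the result dict from keys and makes a single left-to-right pass over args, matching '--' tokens against a pending-key set.
import Mathlib
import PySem

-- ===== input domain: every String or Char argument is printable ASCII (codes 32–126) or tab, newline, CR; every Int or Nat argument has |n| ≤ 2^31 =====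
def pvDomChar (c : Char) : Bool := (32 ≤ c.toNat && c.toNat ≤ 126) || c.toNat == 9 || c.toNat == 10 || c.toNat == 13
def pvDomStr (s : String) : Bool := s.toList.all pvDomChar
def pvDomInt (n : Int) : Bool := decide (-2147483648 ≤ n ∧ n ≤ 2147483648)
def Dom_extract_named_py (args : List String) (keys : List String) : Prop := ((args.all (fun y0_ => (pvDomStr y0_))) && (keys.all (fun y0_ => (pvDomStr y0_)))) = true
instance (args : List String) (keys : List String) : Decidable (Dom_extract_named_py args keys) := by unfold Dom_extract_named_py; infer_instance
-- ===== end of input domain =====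

-- B replaces A's per-key search through args (args.index for each key) by a single left-to-right
-- pass over args against a pending-key set; the returned dict is proved identical.


-- ===== PORT A =====
-- for key in keys: idx = args.index("--"+key); result[key] = args[idx+1] if valid else None
def extract_named_py (args : List String) (keys : List String) : List (String × Option String) :=
  (keys.foldl (fun result key =>
      match PySem.List.index? args ("--" ++ key) with
      | some idx =>
          if idx + 1 < args.length ∧ PySem.Str.startswith (PySem.List.pyGetD args ((idx : Int) + 1) "") "--" = false
          then result.insert key (some (PySem.List.pyGetD args ((idx : Int) + 1) ""))
          else result.insert key none
      | none => result.insert key none)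
    PySem.Dict.empty).items

-- ===== PORT B =====
-- result = {k: None for k in keys}; pending = set(keys); one pass over zip(args, [*args[1:], None])
def extract_named_py_alt (args : List String) (keys : List String) : List (String × Option String) :=
  let result0 : PySem.Dict String (Option String) :=
    keys.foldl (fun d k => d.insert k none) PySem.Dict.empty
  let pending0 : PySem.Set String := PySem.Set.ofList keys
  let nexts : List (Option String) := (PySem.List.slice args (some 1) none).map some ++ [none]
  let final := (args.zip nexts).foldl
    (fun (st : PySem.Dict String (Option String) × PySem.Set String) p =>
      if PySem.Str.startswith p.1 "--" = true then
        let name := PySem.Str.slice p.1 (some 2) none   -- tok[2:]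
        if name ∈ st.2 then
          let pending' : PySem.Set String := st.2.discard name
          match p.2 with
          | some nxt =>
              if PySem.Str.startswith nxt "--" = false then (st.1.insert name (some nxt), pending')
              else (st.1, pending')
          | none => (st.1, pending')
        else st
      else st)
    (result0, pending0)
  final.1.items

-- ===== PRECONDITION & SPEC =====
def Spec_extract_named_py (args : List String) (keys : List String) (out : List (String × Option String)) : Prop := out = extract_named_py_alt args keys
instance (args : List String) (keys : List String) (out : List (String × Option String)) : Decidable (Spec_extract_named_py args keys out) := by unfold Spec_extract_named_py; infer_instance

-- ===== CLAIM (what is proved, stated in full; the proofs are below) =====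
def Claim_equal_extract_named_py : Prop := ∀ (args : List String) (keys : List String), Dom_extract_named_py args keys → Spec_extract_named_py args keys (extract_named_py args keys)

-- ===== LEMMAS AND PROOFS =====

-- the value both programs associate with key k: walk args; at the FIRST token "--k",
-- return the next token unless it is missing or itself starts with "--"
def pvValFrom : List String → String → Option String
  | [], _ => none
  | a :: rest, k =>
      if a = "--" ++ k then
        match rest with
        | [] => none
        | b :: _ => if PySem.Str.startswith b "--" = true then none else some b
      else pvValFrom rest k

-- the (token, next-token?) stream B folds over
def pvPairs : List String → List (String × Option String)
  | [] => []
  | a :: rest => (a, rest.head?) :: pvPairs rest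

-- B's final value for key k, starting from stored value old with pending set p
def pvUpd (p : List String) (ar : List String) (k : String) (old : Option String) : Option String :=
  if k ∈ p ∧ (pvValFrom ar k).isSome then pvValFrom ar k else old

-- the loop body of port B, named for the proofs (definitionally the lambda in the port)
def pvStepB (st : PySem.Dict String (Option String) × PySem.Set String) (p : String × Option String) :
    PySem.Dict String (Option String) × PySem.Set String :=
  if PySem.Str.startswith p.1 "--" = true then
    let name := PySem.Str.slice p.1 (some 2) none
    if name ∈ st.2 then
      let pending' : PySem.Set String := st.2.discard name
      match p.2 with
      | some nxt =>
          if PySem.Str.startswith nxt "--" = false then (st.1.insert name (some nxt), pending')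
          else (st.1, pending')
      | none => (st.1, pending')
    else st
  else st

theorem pv_dashes : "--".toList = ['-','-'] := by decide

theorem pv_flag_startswith (k : String) : PySem.Str.startswith ("--" ++ k) "--" = true := by
  rw [PySem.Str.startswith_eq, PySem.Chars.startswith_iff]
  exact ⟨k.toList, by simp⟩

theorem pv_slice_two (a : String) : PySem.Str.slice a (some 2) none = String.ofList (a.toList.drop 2) := by
  apply String.toList_inj.mp
  simp only [PySem.Str.slice, PySem.Chars.slice_eq_listSlice, String.toList_ofList]
  rw [PySem.List.slice_from _ (by norm_num)]
  rfl

theorem pv_startswith_decomp (a : String) (h : PySem.Str.startswith a "--" = true) :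
    a = "--" ++ String.ofList (a.toList.drop 2) := by
  rw [PySem.Str.startswith_eq, PySem.Chars.startswith_iff] at h
  obtain ⟨t, ht⟩ := h
  rw [pv_dashes] at ht
  apply String.toList_inj.mp
  simp only [String.toList_append, String.toList_ofList, pv_dashes]
  rw [← ht]
  rfl

-- a token starting with "--" equals "--"++k exactly when k is the token minus the dashes
theorem pv_flag_iff (a k : String) (h : PySem.Str.startswith a "--" = true) :
    a = "--" ++ k ↔ k = PySem.Str.slice a (some 2) none := by
  rw [pv_slice_two]
  constructor
  · intro hak
    apply String.toList_inj.mp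
    simp [hak, pv_dashes]
  · intro hk
    rw [hk]
    exact pv_startswith_decomp a h

theorem pv_mem_discard (s : PySem.Set String) (x y : String) : y ∈ s.discard x ↔ y ∈ s ∧ y ≠ x := by
  simp [PySem.Set.discard]

theorem pvValFrom_of_not_mem (k : String) : ∀ (ar : List String), ("--" ++ k) ∉ ar → pvValFrom ar k = none := by
  intro ar
  induction ar with
  | nil => intro _; rfl
  | cons a rest ih =>
      intro h
      simp only [List.mem_cons, not_or] at h
      simp only [pvValFrom, if_neg (Ne.symm h.1)]
      exact ih h.2

theorem pvValFrom_append (k : String) : ∀ (pre suf : List String), ("--" ++ k) ∉ pre →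
    pvValFrom (pre ++ suf) k = pvValFrom suf k := by
  intro pre
  induction pre with
  | nil => intro suf _; rfl
  | cons a rest ih =>
      intro suf h
      simp only [List.mem_cons, not_or] at h
      simp only [List.cons_append, pvValFrom, if_neg (Ne.symm h.1)]
      exact ih suf h.2

-- A's per-key computation equals pvValFrom
theorem pv_A_val (args : List String) (k : String) :
    (match PySem.List.index? args ("--" ++ k) with
     | some idx =>
         if idx + 1 < args.length ∧ PySem.Str.startswith (PySem.List.pyGetD args ((idx : Int) + 1) "") "--" = false
         then some (PySem.List.pyGetD args ((idx : Int) + 1) "")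
         else none
     | none => (none : Option String)) = pvValFrom args k := by
  cases hidx : PySem.List.index? args ("--" ++ k) with
  | none =>
      rw [PySem.List.index?_eq_none_iff] at hidx
      simp [pvValFrom_of_not_mem k args hidx]
  | some idx =>
      rw [PySem.List.index?_eq_some_iff] at hidx
      obtain ⟨pre, suf, hargs, hlen, hnot⟩ := hidx
      subst hargs
      rw [pvValFrom_append k pre _ hnot]
      dsimp only
      have hcast : ((idx : Int) + 1) = ((idx + 1 : Nat) : Int) := by push_cast; ring
      rw [hcast, PySem.List.pyGetD_natCast]
      cases suf with
      | nil =>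
          have hlt : ¬ (idx + 1 < (pre ++ [("--" ++ k)]).length) := by
            simp [← hlen]
          rw [if_neg (fun hc => hlt hc.1)]
          simp [pvValFrom]
      | cons b suf' =>
          have hget : (pre ++ ("--" ++ k) :: b :: suf').getD (idx + 1) "" = b := by
            rw [← hlen, List.getD_eq_getElem?_getD, List.getElem?_append_right (by omega)]
            simp
          have hlt : idx + 1 < (pre ++ ("--" ++ k) :: b :: suf').length := by
            simp [← hlen]
          rw [hget]
          cases hb : PySem.Str.startswith b "--" with
          | false =>
              rw [if_pos ⟨hlt, rfl⟩]
              simp [pvValFrom]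
              rw [← pv_dashes, ← PySem.Str.startswith_eq]
              exact hb
          | true =>
              rw [if_neg (fun hc => absurd hc.2 (by simp))]
              simp [pvValFrom]
              rw [← pv_dashes, ← PySem.Str.startswith_eq]
              exact hb

-- a foldl of inserts whose value depends only on the key builds exactly dedup-of-keys ↦ value
theorem pv_foldl_insert_items (f : String → Option String) (keys : List String) :
    ((keys.foldl (fun d k => d.insert k (f k)) PySem.Dict.empty)).items
      = (PySem.Set.ofList keys).map (fun k => (k, f k)) := by
  induction keys using List.reverseRecOn with
  | nil => rfl
  | append_singleton ks k ih =>
      rw [List.foldl_concat, PySem.Set.ofList_append_singleton]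
      set D := ks.foldl (fun d k => d.insert k (f k)) PySem.Dict.empty with hD
      by_cases hk : k ∈ PySem.Set.ofList ks
      · have hc : D.contains k = true := by
          rw [PySem.Dict.contains_iff_mem_keys]
          simp only [PySem.Dict.keys, ih, List.map_map]
          simpa using hk
        have hadd : (PySem.Set.ofList ks).add k = PySem.Set.ofList ks := by
          simp only [PySem.Set.add]
          rw [if_pos (by simpa using hk)]
        rw [hadd, ← ih]
        show (D.insert k (f k)).items = D.items
        simp only [PySem.Dict.insert, if_pos hc]
        rw [ih, List.map_map]
        apply List.map_congr_left
        intro x _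
        by_cases hxk : x = k
        · simp [hxk]
        · simp [Function.comp, hxk]
      · have hc : D.contains k = false := by
          rw [← Bool.not_eq_true, PySem.Dict.contains_iff_mem_keys]
          simp only [PySem.Dict.keys, ih, List.map_map]
          simpa using hk
        have hadd : (PySem.Set.ofList ks).add k = PySem.Set.ofList ks ++ [k] := by
          simp only [PySem.Set.add]
          rw [if_neg (by simpa using hk)]
        rw [hadd]
        show (D.insert k (f k)).items = _
        simp only [PySem.Dict.insert, hc]
        simp [ih]

theorem pv_zip_nexts : ∀ (args : List String),
    args.zip ((args.drop 1).map some ++ [none]) = pvPairs args := by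
  intro args
  induction args with
  | nil => rfl
  | cons a rest ih =>
      cases rest with
      | nil => rfl
      | cons b r =>
          have ih' : (b :: r).zip (r.map some ++ [none]) = pvPairs (b :: r) := by simpa using ih
          simp only [List.drop_one, List.tail_cons, List.map_cons, List.cons_append,
            List.zip_cons_cons, pvPairs, List.head?_cons]
          rw [ih']
          simp [pvPairs]

-- B's per-key update commutes with consuming one flag token, away from that flag's key
theorem pv_upd_eq (p : PySem.Set String) (a name : String) (rest : List String)
    (hflag : ∀ k : String, a = "--" ++ k ↔ k = name) (k : String) (old : Option String) (hk : k ≠ name) :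
    pvUpd (p.discard name) rest k old = pvUpd p (a :: rest) k old := by
  have hak : ¬ (a = "--" ++ k) := fun hc => hk ((hflag k).mp hc)
  have hv : pvValFrom (a :: rest) k = pvValFrom rest k := by
    simp only [pvValFrom]
    rw [if_neg hak]
  simp only [pvUpd, hv, pv_mem_discard]
  by_cases hkp : k ∈ p
  · simp [hkp, hk]
  · simp [hkp]

-- main loop invariant for B
theorem pv_loopB : ∀ (ar : List String) (d : PySem.Dict String (Option String)) (p : PySem.Set String),
    (∀ x ∈ p, d.contains x = true) →
    (((pvPairs ar).foldl pvStepB (d, p)).1).items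
      = d.items.map (fun kv => (kv.1, pvUpd p ar kv.1 kv.2)) := by
  intro ar
  induction ar with
  | nil =>
      intro d p _
      simp [pvPairs, pvUpd, pvValFrom]
  | cons a rest ih =>
      intro d p hp
      simp only [pvPairs, List.foldl_cons]
      by_cases hs : PySem.Str.startswith a "--" = true
      · set name := PySem.Str.slice a (some 2) none with hname
        have hflag : ∀ k : String, a = "--" ++ k ↔ k = name := fun k => pv_flag_iff a k hs
        by_cases hm : name ∈ p
        · -- name is pending: it is consumed here
          have hname_eq : a = "--" ++ name := (hflag name).mpr rfl
          have hcont : d.contains name = true := hp name hm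
          have hpd : ∀ x ∈ p.discard name, d.contains x = true :=
            fun x hx => hp x ((pv_mem_discard p name x).mp hx).1
          cases rest with
          | nil =>
              have hstep : pvStepB (d, p) (a, ([] : List String).head?) = (d, p.discard name) := by
                simp only [pvStepB, List.head?_nil, if_pos hs, ← hname, if_pos hm]
              rw [hstep, ih d (p.discard name) hpd]
              apply List.map_congr_left
              intro kv _
              congr 1
              by_cases hk : kv.1 = name
              · rw [hk]
                have hv : pvValFrom (a :: ([] : List String)) name = none := by
                  simp only [pvValFrom]
                  rw [if_pos hname_eq]
                simp [pvUpd, hv]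
              · exact pv_upd_eq p a name [] hflag kv.1 kv.2 hk
          | cons b r =>
              by_cases hb : PySem.Str.startswith b "--" = true
              · -- next token is itself a flag: key is consumed, no value stored
                have hstep : pvStepB (d, p) (a, (b :: r).head?) = (d, p.discard name) := by
                  simp only [pvStepB, List.head?_cons, if_pos hs, ← hname, if_pos hm, hb]
                  simp
                rw [hstep, ih d (p.discard name) hpd]
                apply List.map_congr_left
                intro kv _
                congr 1
                by_cases hk : kv.1 = name
                · rw [hk]
                  have hv : pvValFrom (a :: b :: r) name = none := by
                    simp only [pvValFrom]
                    rw [if_pos hname_eq]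
                    simp
                    rw [← pv_dashes, ← PySem.Str.startswith_eq]
                    exact hb
                  simp [pvUpd, hv]
                · exact pv_upd_eq p a name (b :: r) hflag kv.1 kv.2 hk
              · -- good value: stored at name
                have hb' : PySem.Str.startswith b "--" = false := by simpa using hb
                have hstep : pvStepB (d, p) (a, (b :: r).head?) = (d.insert name (some b), p.discard name) := by
                  simp only [pvStepB, List.head?_cons, if_pos hs, ← hname, if_pos hm, hb']
                  simp
                have hpd' : ∀ x ∈ p.discard name, (d.insert name (some b)).contains x = true := by
                  intro x hx
                  rw [PySem.Dict.contains_insert, hpd x hx]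
                  simp
                rw [hstep, ih _ (p.discard name) hpd']
                have hins : (d.insert name (some b)).items
                    = d.items.map (fun q => if q.1 == name then (name, some b) else q) := by
                  simp only [PySem.Dict.insert, if_pos hcont]
                rw [hins, List.map_map]
                apply List.map_congr_left
                intro kv _
                simp only [Function.comp]
                have hv : pvValFrom (a :: b :: r) name = some b := by
                  simp only [pvValFrom]
                  rw [if_pos hname_eq]
                  simp
                  rw [← pv_dashes, ← PySem.Str.startswith_eq]
                  exact hb'
                by_cases hk : kv.1 = name
                · rw [if_pos (by simp [hk])]
                  have h1 : pvUpd (p.discard name) (b :: r) name (some b) = some b := by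
                    simp [pvUpd]
                  have h2 : pvUpd p (a :: b :: r) kv.1 kv.2 = some b := by
                    rw [hk]
                    simp [pvUpd, hv, hm]
                  rw [h1, h2, hk]
                · rw [if_neg (by simp [hk])]
                  congr 1
                  exact pv_upd_eq p a name (b :: r) hflag kv.1 kv.2 hk
        · -- token is a flag, but not a pending key: no-op
          have hstep : pvStepB (d, p) (a, rest.head?) = (d, p) := by
            simp only [pvStepB, if_pos hs, ← hname]
            rw [if_neg hm]
          rw [hstep, ih d p hp]
          apply List.map_congr_left
          intro kv _
          congr 1
          by_cases hkp : kv.1 ∈ p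
          · have hak : ¬ (a = "--" ++ kv.1) := fun hc => hm (((hflag kv.1).mp hc) ▸ hkp)
            have hv : pvValFrom (a :: rest) kv.1 = pvValFrom rest kv.1 := by
              simp only [pvValFrom]
              rw [if_neg hak]
            simp only [pvUpd, hv]
          · simp [pvUpd, hkp]
      · -- token is not a flag: no-op
        have hstep : pvStepB (d, p) (a, rest.head?) = (d, p) := by
          simp only [pvStepB]
          rw [if_neg hs]
        rw [hstep, ih d p hp]
        apply List.map_congr_left
        intro kv _
        have hak : ¬ (a = "--" ++ kv.1) := fun hc => hs (hc ▸ pv_flag_startswith kv.1)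
        have hv : pvValFrom (a :: rest) kv.1 = pvValFrom rest kv.1 := by
          simp only [pvValFrom]
          rw [if_neg hak]
        simp only [pvUpd, hv]

-- port A in closed form
theorem pv_A_eq (args keys : List String) :
    extract_named_py args keys = (PySem.Set.ofList keys).map (fun k => (k, pvValFrom args k)) := by
  unfold extract_named_py
  have hbody : (fun (result : PySem.Dict String (Option String)) key =>
      match PySem.List.index? args ("--" ++ key) with
      | some idx =>
          if idx + 1 < args.length ∧ PySem.Str.startswith (PySem.List.pyGetD args ((idx : Int) + 1) "") "--" = false
          then result.insert key (some (PySem.List.pyGetD args ((idx : Int) + 1) ""))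
          else result.insert key none
      | none => result.insert key none)
      = fun result key => result.insert key (pvValFrom args key) := by
    funext result key
    rw [← pv_A_val args key]
    cases hidx : PySem.List.index? args ("--" ++ key) with
    | none => rfl
    | some idx =>
        by_cases hC : idx + 1 < args.length ∧ PySem.Str.startswith (PySem.List.pyGetD args ((idx : Int) + 1) "") "--" = false
        · simp only [if_pos hC]
        · simp only [if_neg hC]
  rw [hbody, pv_foldl_insert_items (pvValFrom args) keys]

-- port B in the same closed form
theorem pv_B_eq (args keys : List String) :
    extract_named_py_alt args keys = (PySem.Set.ofList keys).map (fun k => (k, pvValFrom args k)) := by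
  unfold extract_named_py_alt
  simp only []
  rw [PySem.List.slice_from args (by norm_num)]
  show ((args.zip ((args.drop (Int.toNat 1)).map some ++ [none])).foldl pvStepB
      (keys.foldl (fun d k => d.insert k none) PySem.Dict.empty, PySem.Set.ofList keys)).1.items = _
  have h1 : Int.toNat 1 = 1 := rfl
  rw [h1, pv_zip_nexts]
  have hitems : (keys.foldl (fun d k => d.insert k none) PySem.Dict.empty).items
      = (PySem.Set.ofList keys).map (fun k => (k, (none : Option String))) :=
    pv_foldl_insert_items (fun _ => none) keys
  have hp0 : ∀ x ∈ PySem.Set.ofList keys,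
      (keys.foldl (fun (d : PySem.Dict String (Option String)) (k : String) => d.insert k none)
        PySem.Dict.empty).contains x = true := by
    intro x hx
    rw [PySem.Dict.contains_iff_mem_keys]
    simp only [PySem.Dict.keys, hitems, List.map_map]
    simpa using hx
  rw [pv_loopB args _ _ hp0, hitems, List.map_map]
  apply List.map_congr_left
  intro k hk
  simp only [Function.comp]
  have : pvUpd (PySem.Set.ofList keys) args k none = pvValFrom args k := by
    cases hv : pvValFrom args k with
    | none => simp [pvUpd, hv]
    | some v => simp [pvUpd, hv, hk]
  rw [this]

-- ===== VERDICT (by name: the statement is the Claim_ definition above) =====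
theorem extract_named_py_spec : Claim_equal_extract_named_py := by
  intro args keys _dom
  show extract_named_py args keys = extract_named_py_alt args keys
  rw [pv_A_eq, pv_B_eq]
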